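-- pv_equiv track=rewrite | github.com/Sheeveboi/IZOStore | izoSystemsUtil.py | createTimeStamp
-- ===== SOURCE A (Python) =====
-- def createTimeStamp(t) :
--     s = 0;
--     m = 0;
--     h = 0;
--     d = 0;
--
--     for i in range(t):
--         s += 1;
--         if (s >= 60) :
--             m += 1;
--             s = 0;
--         if (m >= 60) :
--             h += 1;
--             m = 0;
--         if (h >= 24) :
--             h = 0;
--             d += 1;
--
--     return (s,m,h,d);
-- ===== SOURCE B (Python) =====
-- def createTimeStamp(t):
--     if t <= 0:
--         return (0, 0, 0, 0)
--     m, s = divmod(t, 60)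
--     h, m = divmod(m, 60)
--     d, h = divmod(h, 24)
--     return (s, m, h, d)
-- ===== Notes on version B (the rewrite author's own statement) =====
-- stated objective: faster
-- what changed: Replaces A's per-second counting loop (one iteration per unit of t) with three direct divmod operations computing the s/m/h/d components in constant time.
import Mathlib
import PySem

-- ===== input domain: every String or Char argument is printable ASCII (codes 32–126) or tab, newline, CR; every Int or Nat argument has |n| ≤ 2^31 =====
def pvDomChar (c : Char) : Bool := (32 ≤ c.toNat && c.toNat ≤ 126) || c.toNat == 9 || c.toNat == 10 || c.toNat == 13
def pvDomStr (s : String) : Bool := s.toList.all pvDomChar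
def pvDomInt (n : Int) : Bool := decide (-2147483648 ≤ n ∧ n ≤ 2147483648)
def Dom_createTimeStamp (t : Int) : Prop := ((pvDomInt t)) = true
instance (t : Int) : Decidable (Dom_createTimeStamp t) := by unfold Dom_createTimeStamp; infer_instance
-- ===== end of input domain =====

-- B replaces A's one-tick-per-second loop by three divmods (O(1) instead of O(t)); objective: faster.

-- ===== PORT A =====
def pvStepA (st : Int × Int × Int × Int) : Int × Int × Int × Int :=
  let s := st.1 + 1
  let m := st.2.1
  let h := st.2.2.1
  let d := st.2.2.2
  let sm : Int × Int := if s ≥ 60 then (0, m + 1) else (s, m)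
  let mh : Int × Int := if sm.2 ≥ 60 then (0, h + 1) else (sm.2, h)
  let hd : Int × Int := if mh.2 ≥ 24 then (0, d + 1) else (mh.2, d)
  (sm.1, mh.1, hd.1, hd.2)

def createTimeStamp (t : Int) : Int × Int × Int × Int :=
  (PySem.List.pyRange 0 t 1).foldl (fun st _ => pvStepA st) (0, 0, 0, 0)

-- ===== PORT B =====
def createTimeStamp_alt (t : Int) : Int × Int × Int × Int :=
  if t ≤ 0 then (0, 0, 0, 0)
  else
    let m0 := PySem.Int.floordiv t 60
    let s  := PySem.Int.mod t 60
    let h0 := PySem.Int.floordiv m0 60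
    let m  := PySem.Int.mod m0 60
    let d  := PySem.Int.floordiv h0 24
    let h  := PySem.Int.mod h0 24
    (s, m, h, d)

-- ===== PRECONDITION & SPEC =====
def Spec_createTimeStamp (t : Int) (out : Int × Int × Int × Int) : Prop := out = createTimeStamp_alt t
instance (t : Int) (out : Int × Int × Int × Int) : Decidable (Spec_createTimeStamp t out) := by unfold Spec_createTimeStamp; infer_instance

-- ===== CLAIM (what is proved, stated in full; the proofs are below) =====
def Claim_equal_createTimeStamp : Prop := ∀ (t : Int), Dom_createTimeStamp t → Spec_createTimeStamp t (createTimeStamp t)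

-- ===== LEMMAS AND PROOFS =====

theorem pvStepA_arith (n : Nat) :
    pvStepA (((n % 60 : Nat) : Int), ((n / 60 % 60 : Nat) : Int),
             ((n / 3600 % 24 : Nat) : Int), ((n / 86400 : Nat) : Int))
    = ((((n + 1) % 60 : Nat) : Int), (((n + 1) / 60 % 60 : Nat) : Int),
       (((n + 1) / 3600 % 24 : Nat) : Int), (((n + 1) / 86400 : Nat) : Int)) := by
  unfold pvStepA
  simp only []
  split_ifs with h1 h2 h3 h3' h2' h3'' <;>
    refine Prod.ext ?_ (Prod.ext ?_ (Prod.ext ?_ ?_)) <;>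
    push_cast at * <;> omega

theorem createTimeStamp_nat (n : Nat) :
    createTimeStamp (n : Int)
    = (((n % 60 : Nat) : Int), ((n / 60 % 60 : Nat) : Int),
       ((n / 3600 % 24 : Nat) : Int), ((n / 86400 : Nat) : Int)) := by
  induction n with
  | zero => simp [createTimeStamp]
  | succ k ih =>
    unfold createTimeStamp at *
    have hsplit : PySem.List.pyRange 0 ((k + 1 : Nat) : Int) 1
        = PySem.List.pyRange 0 (k : Int) 1 ++ [(k : Int)] := by
      push_cast
      exact PySem.List.pyRange_one_succ_right (by positivity)
    rw [hsplit, List.foldl_append, ih]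
    simpa using pvStepA_arith k

-- ===== VERDICT (by name: the statement is the Claim_ definition above) =====
theorem createTimeStamp_spec : Claim_equal_createTimeStamp := by
  intro t _
  unfold Spec_createTimeStamp createTimeStamp_alt
  rcases le_or_gt t 0 with ht | ht
  · rw [if_pos ht]
    unfold createTimeStamp
    rw [PySem.List.pyRange_one_eq_nil ht]
    rfl
  · rw [if_neg (by omega)]
    obtain ⟨n, rfl⟩ : ∃ n : Nat, t = (n : Int) := ⟨t.toNat, (Int.toNat_of_nonneg (by omega)).symm⟩
    rw [createTimeStamp_nat]
    have h60 : ((60 : Int)) = ((60 : Nat) : Int) := by norm_num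
    have h24 : ((24 : Int)) = ((24 : Nat) : Int) := by norm_num
    simp only [h60, h24, PySem.Int.floordiv_natCast, PySem.Int.mod_natCast]
    refine Prod.ext rfl (Prod.ext rfl (Prod.ext ?_ ?_)) <;>
      simp [Nat.div_div_eq_div_mul]
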